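-- pv_equiv track=rewrite | github.com/puo22/Proyecto-3 | reporte.py | verificar_indentacion
-- ===== SOURCE A (Python) =====
-- def verificar_indentacion(source: str):
--     """Verifica indentación: solo espacios o tabs, múltiples de 4, pila estilo Python."""
--     lines = source.splitlines()
--     stack = [0]
--     mode = None  # "spaces" | "tabs" | None
--     for ln, raw in enumerate(lines, start=1):
--         stripped = raw.lstrip("\t ")
--         if stripped == "" or stripped.startswith("#"):
--             continue
--         leading = raw[: len(raw) - len(stripped)]
--         if " " in leading and "\t" in leading:
--             return (ln, 1)
--         if mode is None:
--             if "\t" in leading: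
--                 mode = "tabs"
--             elif " " in leading:
--                 mode = "spaces"
--         if mode == "spaces" and "\t" in leading:
--             return (ln, 1)
--         if mode == "tabs" and " " in leading:
--             return (ln, 1)
--
--         if "\t" in leading:
--             width = 4 * len(leading)
--         else:
--             width = len(leading)
--             if width % 4 != 0:
--                 return (ln, 1)
--
--         cur = width
--         top = stack[-1]
--         if cur == top:
--             continue
--         if cur == top + 4:
--             stack.append(cur)
--             continue
--         if cur < top:
--             while stack and stack[-1] > cur:
--                 stack.pop()
--             if not stack or stack[-1] != cur:
--                 return (ln, 1)
--             continue
--         # salto > 4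
--         return (ln, 1)
--     return None
-- ===== SOURCE B (Python) =====
-- def verificar_indentacion(source: str):
--     """Same validation by a different decomposition: the three mode/mixture
--     guards collapse into one uniformity test against a single remembered
--     indentation character, and the stack collapses into one integer width
--     (valid levels are always the consecutive multiples of 4 up to the top,
--     so any width <= prev + 4 that is a multiple of 4 is acceptable)."""
--     prev = 0
--     mode = None  # the single allowed indentation character, once known
--     for ln, raw in enumerate(source.splitlines(), start=1):
--         body = raw.lstrip(" \t")
--         if body == "" or body[0] == "#":
--             continue
--         lead = raw[: len(raw) - len(body)]
--         if lead and mode is None: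
--             mode = "\t" if "\t" in lead else " "
--         if lead and any(c != mode for c in lead):
--             return (ln, 1)
--         width = 4 * len(lead) if mode == "\t" else len(lead)
--         if width % 4 != 0 or width > prev + 4:
--             return (ln, 1)
--         prev = width
--     return None
-- ===== Notes on version B (the rewrite author's own statement) =====
-- stated objective: simpler
-- what changed: The three separate mode/mixed-indentation guards collapse into one uniformity test of the leading whitespace against a single remembered indentation character, and the stack with its inner pop loop collapses into one integer width compared against prev+4 (valid levels are always the consecutive multiples of 4 up to the top).
import Mathlib
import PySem

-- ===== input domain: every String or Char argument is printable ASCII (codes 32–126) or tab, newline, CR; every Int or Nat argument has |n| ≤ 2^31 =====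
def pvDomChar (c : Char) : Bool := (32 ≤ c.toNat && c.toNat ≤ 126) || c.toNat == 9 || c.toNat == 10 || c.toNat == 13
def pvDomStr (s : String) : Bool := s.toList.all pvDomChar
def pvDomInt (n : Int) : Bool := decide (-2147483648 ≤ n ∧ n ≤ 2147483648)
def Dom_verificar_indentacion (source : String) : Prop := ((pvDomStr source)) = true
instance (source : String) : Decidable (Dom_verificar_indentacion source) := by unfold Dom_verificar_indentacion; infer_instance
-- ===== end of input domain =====

-- B merges A's three mode/mixture guards into one uniformity test against a remembered
-- indentation character and replaces the stack (and its pop loop) by one integer width;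
-- proved equal on all inputs.

-- ===== PORT A =====

-- raw.lstrip("\t ") : drop leading chars from the set {'\t',' '} — exact by Python's definition of lstrip(chars)
def viLstrip (raw : List Char) : List Char := raw.dropWhile (fun c => c == '\t' || c == ' ')

-- the stack update for one significant line of width `cur`: `some stack'` = the loop continues
-- with stack', `none` = `return (ln, 1)`.  stack[-1] is read as pyGetD _ (-1) 0: the stack is
-- provably nonempty at every read (starts [0]; it is emptied only immediately before a return).
def viStepA (stack : List Int) (cur : Int) : Option (List Int) :=
  let top := PySem.List.pyGetD stack (-1) 0
  if cur = top then some stack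
  else if cur = top + 4 then some (stack ++ [cur])
  else if cur < top then
    -- `while stack and stack[-1] > cur: stack.pop()` : drop from the END while the top exceeds cur
    let stack' := (stack.reverse.dropWhile (fun t => decide (cur < t))).reverse
    match stack'.getLast? with
    | none => none
    | some t => if t = cur then some stack' else none
  else none  -- salto > 4

def viLoopA : List (List Char) → Int → List Int → Option String → Option (Int × Int)
  | [], _, _, _ => none
  | raw :: rest, ln, stack, mode =>
    let stripped := viLstrip raw
    if stripped = [] ∨ PySem.Chars.startswith stripped ['#'] then
      viLoopA rest (ln + 1) stack mode
    else
      -- raw[: len(raw) - len(stripped)] : a slice [:k] with 0 ≤ k ≤ len(raw) is `take k` — exact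
      let leading := raw.take (raw.length - stripped.length)
      if PySem.Chars.isIn [' '] leading ∧ PySem.Chars.isIn ['\t'] leading then some (ln, 1)
      else
        let mode1 :=
          if mode = none then
            (if PySem.Chars.isIn ['\t'] leading then some "tabs"
             else if PySem.Chars.isIn [' '] leading then some "spaces"
             else none)
          else mode
        if mode1 = some "spaces" ∧ PySem.Chars.isIn ['\t'] leading then some (ln, 1)
        else if mode1 = some "tabs" ∧ PySem.Chars.isIn [' '] leading then some (ln, 1)
        else if PySem.Chars.isIn ['\t'] leading then
          match viStepA stack (4 * (leading.length : Int)) with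
          | none => some (ln, 1)
          | some stack' => viLoopA rest (ln + 1) stack' mode1
        else if PySem.Int.mod (leading.length : Int) 4 ≠ 0 then some (ln, 1)
        else
          match viStepA stack ((leading.length : Int)) with
          | none => some (ln, 1)
          | some stack' => viLoopA rest (ln + 1) stack' mode1

def verificar_indentacion (source : String) : Option (Int × Int) :=
  viLoopA (PySem.Chars.splitlines source.toList) 1 [0] none

-- ===== PORT B =====

-- B's state: `prev`, the current indentation width, and `mode`, the single allowed
-- indentation character once known ("\t" or " " in Source B, a Char here).
def viLoopB : List (List Char) → Int → Int → Option Char → Option (Int × Int)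
  | [], _, _, _ => none
  | raw :: rest, ln, prev, mode =>
    let body := raw.dropWhile (fun c => c == ' ' || c == '\t')
    if body = [] ∨ body.head? = some '#' then viLoopB rest (ln + 1) prev mode
    else
      let lead := raw.take (raw.length - body.length)
      let mode1 :=
        if lead ≠ [] ∧ mode = none then
          some (if PySem.Chars.isIn ['\t'] lead then '\t' else ' ')
        else mode
      -- `any(c != mode for c in lead)` — guarded by `lead and`, so mode is a char here
      if lead ≠ [] ∧ lead.any (fun c => some c != mode1) then some (ln, 1)
      else
        let width : Int := if mode1 = some '\t' then 4 * (lead.length : Int) else (lead.length : Int)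
        if PySem.Int.mod width 4 ≠ 0 ∨ prev + 4 < width then some (ln, 1)
        else viLoopB rest (ln + 1) width mode1

def verificar_indentacion_alt (source : String) : Option (Int × Int) :=
  viLoopB (PySem.Chars.splitlines source.toList) 1 0 none

-- ===== PRECONDITION & SPEC =====
def Spec_verificar_indentacion (source : String) (out : Option (Int × Int)) : Prop := out = verificar_indentacion_alt source
instance (source : String) (out : Option (Int × Int)) : Decidable (Spec_verificar_indentacion source out) := by unfold Spec_verificar_indentacion; infer_instance

-- ===== CLAIM (what is proved, stated in full; the proofs are below) =====
def Claim_equal_verificar_indentacion : Prop := ∀ (source : String), Dom_verificar_indentacion source → Spec_verificar_indentacion source (verificar_indentacion source)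

-- ===== LEMMAS AND PROOFS =====

-- A's stack is always exactly [0, 4, 8, …, 4*k]
def viStackOf (k : Nat) : List Int := (List.range (k + 1)).map (fun i => 4 * (i : Int))

-- correspondence between A's string-valued mode and B's char-valued mode
def viRel (mA : Option String) (mB : Option Char) : Prop :=
  (mA = none ∧ mB = none) ∨ (mA = some "tabs" ∧ mB = some '\t') ∨ (mA = some "spaces" ∧ mB = some ' ')

lemma viStackOf_succ (k : Nat) : viStackOf (k + 1) = viStackOf k ++ [4 * ((k : Int) + 1)] := by
  simp [viStackOf, List.range_succ]

lemma viStackOf_getLast? (k : Nat) : (viStackOf k).getLast? = some (4 * (k : Int)) := by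
  induction k with
  | zero => simp [viStackOf]
  | succ k ih => rw [viStackOf_succ]; simp

lemma viStackOf_top (k : Nat) : PySem.List.pyGetD (viStackOf k) (-1) 0 = 4 * (k : Int) := by
  induction k with
  | zero => decide
  | succ k ih =>
    rw [viStackOf_succ]
    simp [PySem.List.pyGetD_neg_one_append_singleton]

lemma viStackOf_pop (k j : Nat) (h : j ≤ k) :
    (viStackOf k).reverse.dropWhile (fun t => decide ((4 * (j : Int)) < t)) = (viStackOf j).reverse := by
  induction k with
  | zero =>
    interval_cases j
    simp [viStackOf]
  | succ k ih =>
    rcases Nat.lt_or_ge j (k + 1) with hj | hj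
    · rw [viStackOf_succ]
      have hlt : (4 * (j : Int)) < 4 * ((k : Int) + 1) := by
        have : (j : Int) < (k : Int) + 1 := by exact_mod_cast hj
        omega
      simp only [List.reverse_append, List.reverse_singleton, List.singleton_append,
        List.dropWhile_cons, decide_eq_true_eq, hlt]
      exact ih (by omega)
    · have : j = k + 1 := by omega
      subst this
      rw [viStackOf_succ]
      have hnot : ¬ (4 * ((k + 1 : Nat) : Int)) < 4 * ((k : Int) + 1) := by push_cast; omega
      simp only [List.reverse_append, List.reverse_singleton, List.singleton_append,
        List.dropWhile_cons, decide_eq_true_eq]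
      exact if_neg hnot

lemma viStepA_stackOf (k m : Nat) :
    viStepA (viStackOf k) (4 * (m : Int)) = if m ≤ k + 1 then some (viStackOf m) else none := by
  unfold viStepA
  rw [viStackOf_top]
  rcases Nat.lt_trichotomy m k with hm | hm | hm
  · -- m < k : dedent, the pop loop lands exactly on 4*m
    have h1 : ¬ (4 * (m : Int) = 4 * (k : Int)) := by
      have : (m : Int) < (k : Int) := by exact_mod_cast hm
      omega
    have h2 : ¬ (4 * (m : Int) = 4 * (k : Int) + 4) := by
      have : (m : Int) < (k : Int) := by exact_mod_cast hm
      omega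
    have h3 : (4 * (m : Int)) < 4 * (k : Int) := by
      have : (m : Int) < (k : Int) := by exact_mod_cast hm
      omega
    rw [if_neg h1, if_neg h2, if_pos h3, if_pos (by omega)]
    simp only [viStackOf_pop k m (by omega), List.reverse_reverse, viStackOf_getLast?]
    simp
  · -- m = k : same width, stack unchanged
    subst hm
    rw [if_pos rfl, if_pos (by omega)]
  · rcases Nat.lt_or_ge (k + 1) m with hm2 | hm2
    · -- m > k + 1 : jump of more than 4
      have h1 : ¬ (4 * (m : Int) = 4 * (k : Int)) := by
        have : (k : Int) + 1 < (m : Int) := by exact_mod_cast hm2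
        omega
      have h2 : ¬ (4 * (m : Int) = 4 * (k : Int) + 4) := by
        have : (k : Int) + 1 < (m : Int) := by exact_mod_cast hm2
        omega
      have h3 : ¬ ((4 * (m : Int)) < 4 * (k : Int)) := by
        have : (k : Int) + 1 < (m : Int) := by exact_mod_cast hm2
        omega
      rw [if_neg h1, if_neg h2, if_neg h3, if_neg (by omega)]
    · -- m = k + 1 : one indent step, push
      have hm1 : m = k + 1 := by omega
      subst hm1
      have h1 : ¬ (4 * (((k + 1 : Nat)) : Int) = 4 * (k : Int)) := by push_cast; omega
      have h2 : (4 * (((k + 1 : Nat)) : Int) = 4 * (k : Int) + 4) := by push_cast; omega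
      rw [if_neg h1, if_pos h2, if_pos (by omega), viStackOf_succ]
      norm_num

-- lstrip("\t ") and lstrip(" \t") drop the same prefix
lemma viPred_eq : (fun c : Char => c == ' ' || c == '\t') = (fun c : Char => c == '\t' || c == ' ') := by
  funext c; exact Bool.or_comm _ _

lemma viLstripB (raw : List Char) : raw.dropWhile (fun c : Char => c == ' ' || c == '\t') = viLstrip raw := by
  unfold viLstrip; rw [viPred_eq]

-- the `leading` slice is the takeWhile prefix
lemma viLead_eq (p : Char → Bool) (l : List Char) :
    l.take (l.length - (l.dropWhile p).length) = l.takeWhile p := by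
  have h1 : (l.takeWhile p).length + (l.dropWhile p).length = l.length := by
    rw [← List.length_append, List.takeWhile_append_dropWhile]
  have h2 : l.length - (l.dropWhile p).length = (l.takeWhile p).length := by omega
  rw [h2]; exact (List.prefix_iff_eq_take.mp (List.takeWhile_prefix p)).symm

lemma viIsIn_singleton (c : Char) (l : List Char) : PySem.Chars.isIn [c] l = true ↔ c ∈ l := by
  rw [PySem.Chars.isIn_iff_infix]; exact List.singleton_infix_iff c l

lemma viStartswith_hash (l : List Char) :
    (PySem.Chars.startswith l ['#'] = true) ↔ l.head? = some '#' := by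
  rw [PySem.Chars.startswith_iff]
  cases l with
  | nil => simp
  | cons a t => simp [List.cons_prefix_iff]

lemma viLoop_eq (lines : List (List Char)) :
    ∀ (ln : Int) (k : Nat) (mA : Option String) (mB : Option Char), viRel mA mB →
      viLoopA lines ln (viStackOf k) mA = viLoopB lines ln (4 * (k : Int)) mB := by
  induction lines with
  | nil => intro ln k mA mB _; rfl
  | cons raw rest ih =>
    intro ln k mA mB hrel
    simp only [viLoopA, viLoopB]
    rw [viLstripB]
    set body := viLstrip raw with hbodydef
    have hbody : viLstrip raw = body := hbodydef.symm
    clear_value body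
    by_cases hs : body = [] ∨ PySem.Chars.startswith body ['#'] = true
    · have hs2 : body = [] ∨ body.head? = some '#' := by
        rcases hs with h | h
        · exact Or.inl h
        · exact Or.inr ((viStartswith_hash body).mp h)
      rw [if_pos hs, if_pos hs2]
      exact ih _ _ _ _ hrel
    · have hs2 : ¬ (body = [] ∨ body.head? = some '#') := by
        intro h
        apply hs
        rcases h with h | h
        · exact Or.inl h
        · exact Or.inr ((viStartswith_hash body).mpr h)
      rw [if_neg hs, if_neg hs2]
      set lead := raw.take (raw.length - body.length) with hlddef
      have hld : raw.take (raw.length - body.length) = lead := hlddef.symm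
      clear_value lead
      have hleadTW : lead = raw.takeWhile (fun c : Char => c == '\t' || c == ' ') := by
        rw [← hld, ← hbody]; simp only [viLstrip]; exact viLead_eq _ raw
      have hmem : ∀ c ∈ lead, c = '\t' ∨ c = ' ' := by
        intro c hc
        rw [hleadTW] at hc
        have := List.mem_takeWhile_imp hc
        simpa using this
      have hmodT : PySem.Int.mod (4 * ((lead.length : Nat) : Int)) 4 = 0 :=
        (PySem.Int.mod_eq_zero_iff_dvd _ _).mpr ⟨(lead.length : Int), by ring⟩
      have hk4 : ¬ (4 * (k : Int) + 4 < 0) := by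
        have := Int.natCast_nonneg k; omega
      by_cases htab : '\t' ∈ lead
      · have hne : lead ≠ [] := List.ne_nil_of_mem htab
        have htab' : PySem.Chars.isIn ['\t'] lead = true := (viIsIn_singleton _ _).mpr htab
        by_cases hsp : ' ' ∈ lead
        · -- mixed indentation: both return (ln, 1)
          have hsp' : PySem.Chars.isIn [' '] lead = true := (viIsIn_singleton _ _).mpr hsp
          rcases hrel with ⟨rfl, rfl⟩ | ⟨rfl, rfl⟩ | ⟨rfl, rfl⟩
          · have hany : lead.any (fun c => some c != some '\t') = true :=
              List.any_eq_true.mpr ⟨' ', hsp, by decide⟩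
            simp [htab', hsp', hne, hany]
          · have hany : lead.any (fun c => some c != some '\t') = true :=
              List.any_eq_true.mpr ⟨' ', hsp, by decide⟩
            simp [htab', hsp', hne, hany]
          · have hany : lead.any (fun c => some c != some ' ') = true :=
              List.any_eq_true.mpr ⟨'\t', htab, by decide⟩
            simp [htab', hsp', hne, hany]
        · -- an all-tab leading run
          have hsp' : PySem.Chars.isIn [' '] lead = false := by
            rw [Bool.eq_false_iff]; exact fun h => hsp ((viIsIn_singleton _ _).mp h)
          have hall : ∀ c ∈ lead, c = '\t' := fun c hc =>
            (hmem c hc).resolve_right (fun h => hsp (h ▸ hc))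
          have hany : lead.any (fun c => some c != some '\t') = false :=
            List.any_eq_false.mpr (fun c hc => by rw [hall c hc]; decide)
          rcases hrel with ⟨rfl, rfl⟩ | ⟨rfl, rfl⟩ | ⟨rfl, rfl⟩
          · by_cases h6 : lead.length ≤ k + 1
            · have h6' : ¬ (4 * (k : Int) + 4 < 4 * (lead.length : Int)) := by
                have : (lead.length : Int) ≤ (k : Int) + 1 := by exact_mod_cast h6
                omega
              simp [htab', hsp', hne, hany, viStepA_stackOf, h6, h6']
              exact ih _ _ _ _ (Or.inr (Or.inl ⟨rfl, rfl⟩))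
            · have h6' : 4 * (k : Int) + 4 < 4 * (lead.length : Int) := by
                have : (k : Int) + 1 < (lead.length : Int) := by exact_mod_cast Nat.lt_of_not_le h6
                omega
              simp [htab', hsp', hne, hany, viStepA_stackOf, h6, h6']
          · by_cases h6 : lead.length ≤ k + 1
            · have h6' : ¬ (4 * (k : Int) + 4 < 4 * (lead.length : Int)) := by
                have : (lead.length : Int) ≤ (k : Int) + 1 := by exact_mod_cast h6
                omega
              simp [htab', hsp', hne, hany, viStepA_stackOf, h6, h6']
              exact ih _ _ _ _ (Or.inr (Or.inl ⟨rfl, rfl⟩))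
            · have h6' : 4 * (k : Int) + 4 < 4 * (lead.length : Int) := by
                have : (k : Int) + 1 < (lead.length : Int) := by exact_mod_cast Nat.lt_of_not_le h6
                omega
              simp [htab', hsp', hne, hany, viStepA_stackOf, h6, h6']
          · -- spaces mode but a tab appears: both return (ln, 1)
            have hany2 : lead.any (fun c => some c != some ' ') = true :=
              List.any_eq_true.mpr ⟨'\t', htab, by decide⟩
            simp [htab', hsp', hne, hany2]
      · have htab' : PySem.Chars.isIn ['\t'] lead = false := by
          rw [Bool.eq_false_iff]; exact fun h => htab ((viIsIn_singleton _ _).mp h)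
        by_cases hsp : ' ' ∈ lead
        · -- an all-space leading run
          have hne : lead ≠ [] := List.ne_nil_of_mem hsp
          have hsp' : PySem.Chars.isIn [' '] lead = true := (viIsIn_singleton _ _).mpr hsp
          have hall : ∀ c ∈ lead, c = ' ' := fun c hc =>
            (hmem c hc).resolve_left (fun h => htab (h ▸ hc))
          have hany : lead.any (fun c => some c != some ' ') = false :=
            List.any_eq_false.mpr (fun c hc => by rw [hall c hc]; decide)
          rcases hrel with ⟨rfl, rfl⟩ | ⟨rfl, rfl⟩ | ⟨rfl, rfl⟩
          · by_cases hmod : PySem.Int.mod ((lead.length : Nat) : Int) 4 = 0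
            · obtain ⟨m, hm⟩ : ∃ m : Nat, ((lead.length : Nat) : Int) = 4 * (m : Int) := by
                obtain ⟨c, hc⟩ := (PySem.Int.mod_eq_zero_iff_dvd _ _).mp hmod
                have hc0 : (0 : Int) ≤ c := by
                  have := Int.natCast_nonneg lead.length
                  omega
                exact ⟨c.toNat, by omega⟩
              by_cases h6 : m ≤ k + 1
              · have h6' : ¬ (4 * (k : Int) + 4 < 4 * (m : Int)) := by
                  have : (m : Int) ≤ (k : Int) + 1 := by exact_mod_cast h6
                  omega
                simp [htab', hsp', hne, hany, hm, viStepA_stackOf, h6, h6']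
                exact ih _ _ _ _ (Or.inr (Or.inr ⟨rfl, rfl⟩))
              · have h6' : 4 * (k : Int) + 4 < 4 * (m : Int) := by
                  have : (k : Int) + 1 < (m : Int) := by exact_mod_cast Nat.lt_of_not_le h6
                  omega
                simp [htab', hsp', hne, hany, hm, viStepA_stackOf, h6, h6']
            · have hdvd : ¬ ((4 : Int) ∣ ((lead.length : Nat) : Int)) :=
                fun h => hmod ((PySem.Int.mod_eq_zero_iff_dvd _ _).mpr h)
              simp [htab', hsp', hne, hany, hdvd]
          · -- tabs mode but a space appears: both return (ln, 1)
            have hany2 : lead.any (fun c => some c != some '\t') = true :=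
              List.any_eq_true.mpr ⟨' ', hsp, by decide⟩
            simp [htab', hsp', hne, hany2]
          · by_cases hmod : PySem.Int.mod ((lead.length : Nat) : Int) 4 = 0
            · obtain ⟨m, hm⟩ : ∃ m : Nat, ((lead.length : Nat) : Int) = 4 * (m : Int) := by
                obtain ⟨c, hc⟩ := (PySem.Int.mod_eq_zero_iff_dvd _ _).mp hmod
                have hc0 : (0 : Int) ≤ c := by
                  have := Int.natCast_nonneg lead.length
                  omega
                exact ⟨c.toNat, by omega⟩
              by_cases h6 : m ≤ k + 1
              · have h6' : ¬ (4 * (k : Int) + 4 < 4 * (m : Int)) := by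
                  have : (m : Int) ≤ (k : Int) + 1 := by exact_mod_cast h6
                  omega
                simp [htab', hsp', hne, hany, hm, viStepA_stackOf, h6, h6']
                exact ih _ _ _ _ (Or.inr (Or.inr ⟨rfl, rfl⟩))
              · have h6' : 4 * (k : Int) + 4 < 4 * (m : Int) := by
                  have : (k : Int) + 1 < (m : Int) := by exact_mod_cast Nat.lt_of_not_le h6
                  omega
                simp [htab', hsp', hne, hany, hm, viStepA_stackOf, h6, h6']
            · have hdvd : ¬ ((4 : Int) ∣ ((lead.length : Nat) : Int)) :=
                fun h => hmod ((PySem.Int.mod_eq_zero_iff_dvd _ _).mpr h)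
              simp [htab', hsp', hne, hany, hdvd]
        · -- empty leading: the line is at width 0
          have hnil : lead = [] := by
            cases hl : lead with
            | nil => rfl
            | cons c t =>
              rcases hmem c (by rw [hl]; exact List.mem_cons_self) with rfl | rfl
              · exact absurd (by rw [hl]; exact List.mem_cons_self) htab
              · exact absurd (by rw [hl]; exact List.mem_cons_self) hsp
          have hsp' : PySem.Chars.isIn [' '] lead = false := by
            rw [Bool.eq_false_iff]; exact fun h => hsp ((viIsIn_singleton _ _).mp h)
          subst hnil
          have hstep0 : viStepA (viStackOf k) 0 = some (viStackOf 0) := by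
            have := viStepA_stackOf k 0
            simpa using this
          have hrec : viLoopA rest (ln + 1) (viStackOf 0) mA = viLoopB rest (ln + 1) 0 mB := by
            simpa using ih (ln + 1) 0 mA mB hrel
          have hmA : (if mA = none then (none : Option String) else mA) = mA := by
            cases mA <;> simp
          simp [htab', hsp', hstep0, hk4, hmA]
          exact hrec

-- ===== VERDICT (by name: the statement is the Claim_ definition above) =====
theorem verificar_indentacion_spec : Claim_equal_verificar_indentacion := by
  intro source _
  unfold Spec_verificar_indentacion verificar_indentacion verificar_indentacion_alt
  have h0 : ([ (0 : Int) ]) = viStackOf 0 := by simp [viStackOf]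
  rw [h0]
  have := viLoop_eq (PySem.Chars.splitlines source.toList) 1 0 none none (Or.inl ⟨rfl, rfl⟩)
  simpa using this
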